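-- pv_equiv track=rewrite | github.com/SuzukiDaishi/zukky-voicecore | program/VoiceCore.py | intonation
-- ===== SOURCE A (Python) =====
-- from typing import List, Dict
--
-- def intonation(pitchDic: Dict[int, int], pitchLength: int) -> List[int]:
--     l = []
--     for i in range(0, pitchLength):
--         if i in pitchDic.keys():
--             l.append(pitchDic[i])
--         else:
--             if i > 0:
--                 l.append(l[i - 1])
--             else:
--                 l.append(1)
--     return l
-- ===== SOURCE B (Python) =====
-- def intonation(pitchDic, pitchLength):
--     keys = sorted(k for k in pitchDic if 0 <= k < pitchLength)
--     out = []
--     carry = 1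
--     cursor = 0
--     for k in keys:
--         out.extend([carry] * (k - cursor))
--         carry = pitchDic[k]
--         out.append(carry)
--         cursor = k + 1
--     out.extend([carry] * (pitchLength - cursor))
--     return out
-- ===== Notes on version B (the rewrite author's own statement) =====
-- stated objective: alternative
-- what changed: Instead of testing dict membership at every index and reading back the previous list element, B sorts the in-range keys once and fills whole gap segments with the carried value via list repetition.
import Mathlib
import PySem

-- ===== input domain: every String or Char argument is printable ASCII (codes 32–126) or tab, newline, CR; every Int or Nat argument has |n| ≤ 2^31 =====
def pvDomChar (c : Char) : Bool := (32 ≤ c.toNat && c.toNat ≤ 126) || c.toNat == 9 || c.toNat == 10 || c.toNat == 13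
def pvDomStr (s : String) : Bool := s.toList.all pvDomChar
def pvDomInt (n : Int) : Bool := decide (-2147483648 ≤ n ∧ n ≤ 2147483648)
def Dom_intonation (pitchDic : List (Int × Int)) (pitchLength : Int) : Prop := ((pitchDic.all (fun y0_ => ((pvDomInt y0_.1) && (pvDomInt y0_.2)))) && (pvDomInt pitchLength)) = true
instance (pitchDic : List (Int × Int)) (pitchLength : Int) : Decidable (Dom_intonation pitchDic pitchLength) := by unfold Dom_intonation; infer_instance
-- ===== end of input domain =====

-- B sorts the in-range keys once and fills whole gap segments with the carried value, instead of
-- testing dict membership at every index and reading back the previous list element (alternative algorithm).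

-- ===== PORT A =====
-- A: for i in range(0, pitchLength): append pitchDic[i] if present, else previous element (or 1 at i = 0).
def intonation (pitchDic : List (Int × Int)) (pitchLength : Int) : List Int :=
  let d := PySem.Dict.ofList pitchDic
  (PySem.List.pyRange 0 pitchLength 1).foldl
    (fun l i =>
      match d.get? i with                                   -- if i in pitchDic.keys(): l.append(pitchDic[i])
      | some v => l ++ [v]
      | none =>
        if i > 0 then l ++ [PySem.List.pyGetD l (i - 1) 0]  -- l.append(l[i-1]); index always in range, default unused
        else l ++ [1])                                      -- l.append(1)
    []

-- ===== PORT B =====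
-- B (Source B): sort the keys lying in [0, pitchLength); fold over them with state (out, carry, cursor),
-- filling each gap [cursor, k) with the carried value; finally fill the tail up to pitchLength.
def intonation_alt (pitchDic : List (Int × Int)) (pitchLength : Int) : List Int :=
  let d := PySem.Dict.ofList pitchDic
  let keys := PySem.List.sorted (d.keys.filter (fun k => decide (0 ≤ k) && decide (k < pitchLength))) (fun x => x)
  let s := keys.foldl
    (fun (s : List Int × Int × Int) k =>
      (s.1 ++ List.replicate (k - s.2.2).toNat s.2.1 ++ [d.getD k 0], d.getD k 0, k + 1))
      -- out.extend([carry]*(k-cursor)); carry = pitchDic[k] (k is a key, default unused); out.append(carry); cursor = k+1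
    ([], 1, 0)
  s.1 ++ List.replicate (pitchLength - s.2.2).toNat s.2.1   -- out.extend([carry]*(pitchLength-cursor))

-- ===== PRECONDITION & SPEC =====
def Spec_intonation (pitchDic : List (Int × Int)) (pitchLength : Int) (out : List Int) : Prop := out = intonation_alt pitchDic pitchLength
instance (pitchDic : List (Int × Int)) (pitchLength : Int) (out : List Int) : Decidable (Spec_intonation pitchDic pitchLength out) := by unfold Spec_intonation; infer_instance

-- ===== CLAIM (what is proved, stated in full; the proofs are below) =====
def Claim_equal_intonation : Prop := ∀ (pitchDic : List (Int × Int)) (pitchLength : Int), Dom_intonation pitchDic pitchLength → Spec_intonation pitchDic pitchLength (intonation pitchDic pitchLength)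

-- ===== LEMMAS AND PROOFS =====

-- pvFill d i = the value A's output carries at index i (the key's value if i is a key, else the carried one).
def pvFill (d : PySem.Dict Int Int) : Nat → Int
  | 0 => d.getD 0 1
  | n + 1 => d.getD ((n : Int) + 1) (pvFill d n)

-- pvPrev d c = the carry entering position c (1 before the first position).
def pvPrev (d : PySem.Dict Int Int) : Nat → Int
  | 0 => 1
  | n + 1 => pvFill d n

theorem pvFill_eq_getD (d : PySem.Dict Int Int) (n : Nat) :
    pvFill d n = d.getD (n : Int) (pvPrev d n) := by
  cases n with
  | zero => rfl
  | succ m => simp [pvFill, pvPrev]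

-- On a key-free stretch [c, j] the fill is constant, equal to the carry entering c.
theorem pvFill_gap (d : PySem.Dict Int Int) :
    ∀ (j c : Nat), c ≤ j → (∀ t : Nat, c ≤ t → t ≤ j → d.get? (t : Int) = none) →
      pvFill d j = pvPrev d c := by
  intro j
  induction j with
  | zero =>
    intro c hc hn
    have hc0 : c = 0 := Nat.le_zero.mp hc
    subst hc0
    have h := hn 0 (le_refl 0) (le_refl 0)
    simp only [pvFill, pvPrev, Nat.cast_zero] at *
    exact PySem.Dict.getD_of_get?_eq_none d 1 h
  | succ m ih =>
    intro c hc hn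
    have hnone : d.get? ((m : Int) + 1) = none := by
      have := hn (m + 1) hc (le_refl _)
      push_cast at this
      exact this
    have hstep : pvFill d (m + 1) = pvFill d m := by
      simp only [pvFill]
      exact PySem.Dict.getD_of_get?_eq_none d _ hnone
    rcases Nat.lt_or_ge m.succ c with hlt | hge
    · -- c = m + 1
      have : c = m + 1 := by omega
      subst this
      simp [pvPrev, hstep]
    · rcases Nat.eq_or_lt_of_le hge with heq | hlt'
      · subst heq; simp [pvPrev, hstep]
      · have hcm : c ≤ m := by omega
        rw [hstep]
        exact ih c hcm (fun t h1 h2 => hn t h1 (Nat.le_succ_of_le h2))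

theorem mem_keys_of_get?_eq_some (d : PySem.Dict Int Int) (k v : Int)
    (h : d.get? k = some v) : k ∈ d.keys := by
  by_contra hmem
  rw [(PySem.Dict.get?_eq_none_iff_not_mem_keys d k).mpr hmem] at h
  cases h

-- A's loop over range(0, n) produces exactly the fill values.
theorem loopA (d : PySem.Dict Int Int) (n : Nat) :
    (PySem.List.pyRange 0 (n : Int) 1).foldl
      (fun l i =>
        match d.get? i with
        | some v => l ++ [v]
        | none =>
          if i > 0 then l ++ [PySem.List.pyGetD l (i - 1) 0]
          else l ++ [1])
      []
    = (List.range n).map (pvFill d) := by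
  induction n with
  | zero => simp [PySem.List.pyRange_one_eq_nil (le_refl (0 : Int))]
  | succ n ih =>
    have hcast : ((n + 1 : Nat) : Int) = (n : Int) + 1 := by push_cast; ring
    have h0n : (0 : Int) ≤ (n : Int) := Int.natCast_nonneg n
    rw [hcast, PySem.List.pyRange_one_succ_right h0n, List.foldl_append, ih,
        List.range_succ, List.map_append]
    simp only [List.foldl_cons, List.foldl_nil, List.map_cons, List.map_nil]
    cases h : d.get? (n : Int) with
    | some v =>
      have : pvFill d n = v := by
        rw [pvFill_eq_getD]
        exact PySem.Dict.getD_of_get?_eq_some d _ h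
      rw [this]
    | none =>
      cases n with
      | zero =>
        simp only [Nat.cast_zero, gt_iff_lt, lt_self_iff_false, if_false]
        have : pvFill d 0 = 1 := PySem.Dict.getD_of_get?_eq_none d 1 (by exact_mod_cast h)
        simp [this]
      | succ m =>
        have hpos : ((m + 1 : Nat) : Int) > 0 := by positivity
        rw [if_pos hpos]
        have hidx : ((m + 1 : Nat) : Int) - 1 = (m : Int) := by push_cast; ring
        rw [hidx, PySem.List.pyGetD_natCast]
        have hlen : m < ((List.range (m + 1)).map (pvFill d)).length := by
          simp
        rw [List.getD_eq_getElem _ _ hlen]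
        have : pvFill d (m + 1) = pvFill d m := by
          simp only [pvFill]
          exact PySem.Dict.getD_of_get?_eq_none d _ (by exact_mod_cast h)
        simp [this]

-- B's fold: if the pending keys are exactly d's keys in [cursor, L), strictly increasing, and the
-- carry equals the fill entering the cursor, then the fold plus the tail fill appends the fills of [cursor, L).
theorem loopB (d : PySem.Dict Int Int) (L : Int) :
    ∀ (ks : List Int), ks.Pairwise (· < ·) →
      ∀ (c : Nat) (out : List Int),
        (∀ t : Int, t ∈ ks ↔ t ∈ d.keys ∧ (c : Int) ≤ t ∧ t < L) →
        ((fun s : List Int × Int × Int => s.1 ++ List.replicate (L - s.2.2).toNat s.2.1)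
          (ks.foldl
            (fun (s : List Int × Int × Int) k =>
              (s.1 ++ List.replicate (k - s.2.2).toNat s.2.1 ++ [d.getD k 0], d.getD k 0, k + 1))
            (out, pvPrev d c, (c : Int))))
        = out ++ (List.range' c (L.toNat - c)).map (pvFill d) := by
  intro ks
  induction ks with
  | nil =>
    intro _ c out hiff
    simp only [List.foldl_nil]
    congr 1
    have hlen : (L - (c : Int)).toNat = L.toNat - c := by omega
    rw [hlen]
    symm
    rw [List.eq_replicate_iff]
    refine ⟨by simp, ?_⟩
    intro b hb
    obtain ⟨j, hj, rfl⟩ := List.mem_map.mp hb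
    obtain ⟨hcj, hjL⟩ := List.mem_range'_1.mp hj
    refine pvFill_gap d j c hcj ?_
    intro t h1 h2
    by_contra hne
    obtain ⟨v, hv⟩ := Option.ne_none_iff_exists'.mp hne
    have htk : (t : Int) ∈ d.keys := mem_keys_of_get?_eq_some d _ v hv
    have : (t : Int) ∈ ([] : List Int) := by
      rw [hiff]
      refine ⟨htk, by exact_mod_cast h1, by omega⟩
    cases this
  | cons k rest ih =>
    intro hp c out hiff
    obtain ⟨hkkeys, hck, hkL⟩ := (hiff k).mp List.mem_cons_self
    have hrest := (List.pairwise_cons.mp hp).1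
    have hptail := (List.pairwise_cons.mp hp).2
    have hk0 : (0 : Int) ≤ k := le_trans (Int.natCast_nonneg c) hck
    have hmk : ((k.toNat : Nat) : Int) = k := Int.toNat_of_nonneg hk0
    set m := k.toNat with hm
    have hcm : c ≤ m := by omega
    have hmL : m < L.toNat := by omega
    obtain ⟨v, hv⟩ : ∃ v, d.get? k = some v := by
      have hne : d.get? k ≠ none := by
        rw [Ne, PySem.Dict.get?_eq_none_iff_not_mem_keys]
        intro h; exact h hkkeys
      exact Option.ne_none_iff_exists'.mp hne
    have hgD : d.getD k 0 = v := PySem.Dict.getD_of_get?_eq_some d 0 hv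
    have hfillm : pvFill d m = v := by
      rw [pvFill_eq_getD, hmk]
      exact PySem.Dict.getD_of_get?_eq_some d _ hv
    have hcarry : pvPrev d (m + 1) = v := by simp [pvPrev, hfillm]
    have hiff' : ∀ t : Int, t ∈ rest ↔ t ∈ d.keys ∧ ((m + 1 : Nat) : Int) ≤ t ∧ t < L := by
      intro t
      constructor
      · intro ht
        obtain ⟨h1, _, h3⟩ := (hiff t).mp (List.mem_cons_of_mem k ht)
        have := hrest t ht
        exact ⟨h1, by push_cast; omega, h3⟩
      · rintro ⟨h1, h2, h3⟩
        have hkt : k < t := by push_cast at h2; omega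
        have : t ∈ k :: rest := (hiff t).mpr ⟨h1, by omega, h3⟩
        rcases List.mem_cons.mp this with heq | hmem
        · omega
        · exact hmem
    simp only [List.foldl_cons]
    have hstate : (out ++ List.replicate (k - (c : Int)).toNat (pvPrev d c) ++ [d.getD k 0],
        d.getD k 0, k + 1)
        = (out ++ List.replicate (m - c) (pvPrev d c) ++ [v], pvPrev d (m + 1), ((m + 1 : Nat) : Int)) := by
      rw [hgD, hcarry]
      have h1 : (k - (c : Int)).toNat = m - c := by omega
      have h2 : ((m + 1 : Nat) : Int) = k + 1 := by push_cast; omega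
      rw [h1, h2]
    rw [hstate]
    have hIH := ih hptail (m + 1) (out ++ List.replicate (m - c) (pvPrev d c) ++ [v]) hiff'
    beta_reduce at hIH
    rw [hIH]
    -- now split the target range
    have hgap : ∀ j ∈ List.range' c (m - c), pvFill d j = pvPrev d c := by
      intro j hj
      obtain ⟨hcj, hjm⟩ := List.mem_range'_1.mp hj
      refine pvFill_gap d j c hcj ?_
      intro t h1 h2
      by_contra hne
      obtain ⟨w, hw⟩ := Option.ne_none_iff_exists'.mp hne
      have htk : (t : Int) ∈ d.keys := mem_keys_of_get?_eq_some d _ w hw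
      have htm : (t : Int) < k := by omega
      have : (t : Int) ∈ k :: rest := (hiff t).mpr ⟨htk, by exact_mod_cast h1, by omega⟩
      rcases List.mem_cons.mp this with heq | hmem
      · omega
      · have := hrest _ hmem; omega
    have hsplit : List.range' c (L.toNat - c)
        = List.range' c (m - c) ++ m :: List.range' (m + 1) (L.toNat - (m + 1)) := by
      have h1 : L.toNat - c = (m - c) + ((L.toNat - (m + 1)) + 1) := by omega
      rw [h1, ← List.range'_append_1]
      congr 1
      have h2 : c + (m - c) = m := by omega
      rw [h2, List.range'_succ]
    rw [hsplit, List.map_append, List.map_cons]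
    have hrepl : (List.range' c (m - c)).map (pvFill d) = List.replicate (m - c) (pvPrev d c) := by
      rw [List.eq_replicate_iff]
      exact ⟨by simp, by intro b hb; obtain ⟨j, hj, rfl⟩ := List.mem_map.mp hb; exact hgap j hj⟩
    rw [hrepl, hfillm]
    simp [List.append_assoc]

-- Port A computes the fill values of range(0, pitchLength).
theorem intonation_eq_fill (pitchDic : List (Int × Int)) (pitchLength : Int) :
    intonation pitchDic pitchLength
      = (List.range pitchLength.toNat).map (pvFill (PySem.Dict.ofList pitchDic)) := by
  unfold intonation
  have hr : PySem.List.pyRange 0 pitchLength 1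
      = PySem.List.pyRange 0 ((pitchLength.toNat : Nat) : Int) 1 := by
    by_cases h : 0 ≤ pitchLength
    · rw [Int.toNat_of_nonneg h]
    · have h1 : pitchLength ≤ 0 := by omega
      have h2 : pitchLength.toNat = 0 := by omega
      rw [PySem.List.pyRange_one_eq_nil h1, h2]
      rw [PySem.List.pyRange_one_eq_nil (by simp)]
  rw [hr]
  exact loopA (PySem.Dict.ofList pitchDic) pitchLength.toNat

-- Port B computes the same fill values.
theorem intonation_alt_eq_fill (pitchDic : List (Int × Int)) (pitchLength : Int) :
    intonation_alt pitchDic pitchLength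
      = (List.range pitchLength.toNat).map (pvFill (PySem.Dict.ofList pitchDic)) := by
  unfold intonation_alt
  have hnd : ((PySem.Dict.ofList pitchDic).keys.filter
      (fun k => decide (0 ≤ k) && decide (k < pitchLength))).Nodup :=
    List.Nodup.filter _ (PySem.Dict.nodup_keys_ofList pitchDic)
  have hpair : (PySem.List.sorted ((PySem.Dict.ofList pitchDic).keys.filter
      (fun k => decide (0 ≤ k) && decide (k < pitchLength))) (fun x => x)).Pairwise (· < ·) := by
    have h1 := PySem.List.sorted_pairwise ((PySem.Dict.ofList pitchDic).keys.filter
      (fun k => decide (0 ≤ k) && decide (k < pitchLength))) (fun x => x)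
    have h2 := ((PySem.List.sorted_perm ((PySem.Dict.ofList pitchDic).keys.filter
      (fun k => decide (0 ≤ k) && decide (k < pitchLength))) (fun x => x) false).symm).nodup hnd
    exact (h1.and h2).imp (fun h => lt_of_le_of_ne h.1 h.2)
  have hiff : ∀ t : Int, t ∈ PySem.List.sorted ((PySem.Dict.ofList pitchDic).keys.filter
      (fun k => decide (0 ≤ k) && decide (k < pitchLength))) (fun x => x)
      ↔ t ∈ (PySem.Dict.ofList pitchDic).keys ∧ (((0 : Nat) : Int) ≤ t ∧ t < pitchLength) := by
    intro t
    rw [PySem.List.mem_sorted, List.mem_filter]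
    simp
  have h := loopB (PySem.Dict.ofList pitchDic) pitchLength
    (PySem.List.sorted ((PySem.Dict.ofList pitchDic).keys.filter
      (fun k => decide (0 ≤ k) && decide (k < pitchLength))) (fun x => x))
    hpair 0 [] hiff
  simp only [pvPrev, Nat.cast_zero, Nat.sub_zero] at h
  rw [List.range_eq_range']
  exact h

-- ===== VERDICT (by name: the statement is the Claim_ definition above) =====
theorem intonation_spec : Claim_equal_intonation := by
  intro pitchDic pitchLength _
  show intonation pitchDic pitchLength = intonation_alt pitchDic pitchLength
  rw [intonation_eq_fill, intonation_alt_eq_fill]
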